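-- pv_equiv track=rewrite | github.com/TQT2024/Ai-GI | core/logic.py | is_valid
-- ===== SOURCE A (Python) =====
-- def is_valid(state: int) -> bool:
--     """
--     Check tính hợp lệ của state.
--     Với mỗi bờ (0 và 1), nếu:
--       - Sói và dê cùng bờ mà không có người lái và bắp cải thì không hợp lệ.
--       - Dê và bắp cải cùng bờ mà không có người lái đò và sói thì không hợp lệ.
--     """
--     # Lấy giá trị của từng obj
--     boatman   = (state >> 0) & 1
--     wolf    = (state >> 1) & 1
--     goat    = (state >> 2) & 1
--     cabbage = (state >> 3) & 1
--
--     for bank in (0, 1):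
--         # Nếu sói và dê ở cùng bờ, nhưng nguười lái và bắp cải không ở bờ đó
--         if wolf == bank and goat == bank and (boatman != bank and cabbage != bank):
--             return False
--         # Nếu dê và bắp cải ở cùng bờ, nhưng người lái và sói không ở bờ đó
--         if goat == bank and cabbage == bank and (boatman != bank and wolf != bank):
--             return False
--     return True
-- ===== SOURCE B (Python) =====
-- # The four deadly configurations (boatman bit0, wolf bit1, goat bit2, cabbage bit3)
-- # are fixed, so validity is a membership test of the low nibble against that set:
-- # wolf+goat alone on a bank -> 0b0110, 0b1001; goat+cabbage alone -> 0b1100, 0b0011.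
-- _FORBIDDEN = frozenset((0b0011, 0b0110, 0b1001, 0b1100))
--
--
-- def is_valid(state: int) -> bool:
--     return (state & 0xF) not in _FORBIDDEN
-- ===== Notes on version B (the rewrite author's own statement) =====
-- stated objective: simpler
-- what changed: Replaced per-bit extraction plus per-bank rule checking with a single precomputed lookup: mask the low nibble and test membership in the fixed set of forbidden configurations.
import Mathlib
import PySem

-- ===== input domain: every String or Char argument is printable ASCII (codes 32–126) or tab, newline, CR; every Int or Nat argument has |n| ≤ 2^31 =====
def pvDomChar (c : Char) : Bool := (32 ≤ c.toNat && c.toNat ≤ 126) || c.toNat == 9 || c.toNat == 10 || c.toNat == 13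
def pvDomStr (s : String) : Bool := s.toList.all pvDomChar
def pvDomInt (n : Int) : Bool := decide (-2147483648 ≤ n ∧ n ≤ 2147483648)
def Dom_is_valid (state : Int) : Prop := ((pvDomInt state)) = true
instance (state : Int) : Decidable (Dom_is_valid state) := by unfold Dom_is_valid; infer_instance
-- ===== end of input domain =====

-- ===== PORT A =====
-- B replaces A's bit extraction + per-bank rule loop with a nibble lookup in the
-- fixed forbidden set; return value only, same O(1) cost ("simpler" objective).
-- (state >> k) & 1 ported exactly as Python floor-division by 2^k followed by floor-mod 2.
def pvBit (state : Int) (k : Int) : Int :=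
  PySem.Int.mod (PySem.Int.floordiv state k) 2

-- A's 'for bank in (0, 1)' loop with early returns, as structural recursion over the tuple's elements
def pvLoopA (boatman wolf goat cabbage : Int) : List Int → Bool
  | [] => true
  | bank :: rest =>
    if wolf = bank ∧ goat = bank ∧ (boatman ≠ bank ∧ cabbage ≠ bank) then false
    else if goat = bank ∧ cabbage = bank ∧ (boatman ≠ bank ∧ wolf ≠ bank) then false
    else pvLoopA boatman wolf goat cabbage rest

def is_valid (state : Int) : Bool :=
  let boatman := pvBit state 1
  let wolf    := pvBit state 2
  let goat    := pvBit state 4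
  let cabbage := pvBit state 8
  pvLoopA boatman wolf goat cabbage [0, 1]

-- ===== PORT B =====
-- the module-level frozenset _FORBIDDEN of Source B (a set of ints → PySem.Set Int)
def pvForbidden : PySem.Set Int := PySem.Set.ofList [3, 6, 9, 12]

def is_valid_alt (state : Int) : Bool :=
  !(PySem.Set.contains pvForbidden (PySem.Int.band state 15))

-- ===== PRECONDITION & SPEC =====
def Spec_is_valid (state : Int) (out : Bool) : Prop := out = is_valid_alt state
instance (state : Int) (out : Bool) : Decidable (Spec_is_valid state out) := by unfold Spec_is_valid; infer_instance

-- ===== CLAIM (what is proved, stated in full; the proofs are below) =====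
def Claim_equal_is_valid : Prop := ∀ (state : Int), Dom_is_valid state → Spec_is_valid state (is_valid state)

-- ===== LEMMAS AND PROOFS =====

-- Python's a & 15 is the (always nonnegative) floor-remainder of a by 16.
theorem pvBand15_eq_emod (a : Int) : PySem.Int.band a 15 = a % 16 := by
  unfold PySem.Int.band
  have hand : ∀ n : Nat, n &&& 15 = n % 16 := by
    intro n
    have h := Nat.and_two_pow_sub_one_eq_mod n 4
    norm_num at h
    exact h
  by_cases ha : (0:Int) ≤ a
  · simp only [ha, if_true, show (0:Int) ≤ 15 by norm_num]
    rw [show (15:Int).toNat = 15 from rfl, hand]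
    omega
  · simp only [ha, if_false, if_true, show (0:Int) ≤ 15 by norm_num]
    have h15 : (15:Int).toNat = 15 := rfl
    rw [h15, Nat.and_comm, hand]
    omega

-- A's bit extractions, rewritten to Euclidean div/mod of the low nibble.
theorem pvBit_emod (state k : Int) (hk : 0 < k) :
    pvBit state k = state / k % 2 := by
  unfold pvBit
  rw [PySem.Int.floordiv_eq_ediv_of_pos hk, PySem.Int.mod_eq_emod_of_pos (by norm_num)]

theorem is_valid_spec : Claim_equal_is_valid := by
  intro state _
  unfold Spec_is_valid is_valid is_valid_alt
  rw [pvBand15_eq_emod,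
      pvBit_emod state 1 (by norm_num), pvBit_emod state 2 (by norm_num),
      pvBit_emod state 4 (by norm_num), pvBit_emod state 8 (by norm_num)]
  have h1 : state / 1 % 2 = state % 16 / 1 % 2 := by omega
  have h2 : state / 2 % 2 = state % 16 / 2 % 2 := by omega
  have h4 : state / 4 % 2 = state % 16 / 4 % 2 := by omega
  have h8 : state / 8 % 2 = state % 16 / 8 % 2 := by omega
  rw [h1, h2, h4, h8]
  have hlo : 0 ≤ state % 16 := Int.emod_nonneg state (by norm_num)
  have hhi : state % 16 < 16 := Int.emod_lt_of_pos state (by norm_num)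
  generalize state % 16 = r at hlo hhi ⊢
  interval_cases r <;> decide
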